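-- pv_equiv track=rewrite | github.com/LiYaokun97/nlp_proj | src/week5/BinaryClassification.py | get_start_and_end_answer_index
-- ===== SOURCE A (Python) =====
-- def get_start_and_end_answer_index(start_index, end_index, offset_mapping):
--     start_res = -1
--     end_res = -1
--     for i, t in enumerate(offset_mapping):
--         if t[0] <= start_index and t[1] >= start_index:
--             start_res = i
--         if t[0] <= end_index and t[1] >= end_index:
--             end_res = i
--     return (start_res, end_res)
-- ===== SOURCE B (Python) =====
-- def get_start_and_end_answer_index(start_index, end_index, offset_mapping):
--     def locate(pos):
--         for i in range(len(offset_mapping) - 1, -1, -1):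
--             a, b = offset_mapping[i]
--             if a <= pos <= b:
--                 return i
--         return -1
--     return (locate(start_index), locate(end_index))
-- ===== Notes on version B (the rewrite author's own statement) =====
-- stated objective: alternative
-- what changed: Replaces the single forward pass that keeps overwriting both results with two independent reverse scans that return the first (i.e. last-in-forward-order) containing interval and stop early.
import Mathlib
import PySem

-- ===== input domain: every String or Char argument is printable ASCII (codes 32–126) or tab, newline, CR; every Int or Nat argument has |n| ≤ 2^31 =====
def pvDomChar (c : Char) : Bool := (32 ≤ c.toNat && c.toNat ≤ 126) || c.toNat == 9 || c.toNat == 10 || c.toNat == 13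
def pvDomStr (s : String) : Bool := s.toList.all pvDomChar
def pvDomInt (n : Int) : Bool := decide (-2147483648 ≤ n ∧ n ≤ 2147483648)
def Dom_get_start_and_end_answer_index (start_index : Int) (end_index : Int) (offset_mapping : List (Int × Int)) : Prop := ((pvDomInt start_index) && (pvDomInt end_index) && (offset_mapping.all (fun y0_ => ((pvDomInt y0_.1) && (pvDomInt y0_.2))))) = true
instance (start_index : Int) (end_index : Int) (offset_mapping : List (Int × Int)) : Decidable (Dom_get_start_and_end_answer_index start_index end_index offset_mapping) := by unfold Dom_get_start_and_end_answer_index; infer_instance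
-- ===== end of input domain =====

-- ===== PORT A =====
-- Single forward pass over the enumerated list, overwriting both results on each match.
def pvAStep (start_index end_index : Int) (acc : Int × Int) (p : Int × (Int × Int)) : Int × Int :=
  let acc1 := if p.2.1 ≤ start_index ∧ p.2.2 ≥ start_index then (p.1, acc.2) else acc
  if p.2.1 ≤ end_index ∧ p.2.2 ≥ end_index then (acc1.1, p.1) else acc1

def get_start_and_end_answer_index (start_index : Int) (end_index : Int) (offset_mapping : List (Int × Int)) : Int × Int :=
  (PySem.List.enumerate offset_mapping).foldl (pvAStep start_index end_index) (-1, -1)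

-- ===== PORT B =====
-- Source B's locate: scan indices from the end, return the first containing interval, else -1.
def pvLocate (pos : Int) : List (Int × (Int × Int)) → Int
  | [] => -1
  | (i, (a, b)) :: rest => if a ≤ pos ∧ pos ≤ b then i else pvLocate pos rest

def get_start_and_end_answer_index_alt (start_index : Int) (end_index : Int) (offset_mapping : List (Int × Int)) : Int × Int :=
  (pvLocate start_index (PySem.List.enumerate offset_mapping).reverse,
   pvLocate end_index (PySem.List.enumerate offset_mapping).reverse)

-- ===== PRECONDITION & SPEC =====
def Spec_get_start_and_end_answer_index (start_index : Int) (end_index : Int) (offset_mapping : List (Int × Int)) (out : Int × Int) : Prop := out = get_start_and_end_answer_index_alt start_index end_index offset_mapping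
instance (start_index : Int) (end_index : Int) (offset_mapping : List (Int × Int)) (out : Int × Int) : Decidable (Spec_get_start_and_end_answer_index start_index end_index offset_mapping out) := by unfold Spec_get_start_and_end_answer_index; infer_instance

-- ===== CLAIM (what is proved, stated in full; the proofs are below) =====
def Claim_equal_get_start_and_end_answer_index : Prop := ∀ (start_index : Int) (end_index : Int) (offset_mapping : List (Int × Int)), Dom_get_start_and_end_answer_index start_index end_index offset_mapping → Spec_get_start_and_end_answer_index start_index end_index offset_mapping (get_start_and_end_answer_index start_index end_index offset_mapping)

-- ===== LEMMAS AND PROOFS =====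
-- Proof helper: pvLocate with an arbitrary default value.
def pvLocD (pos : Int) (d : Int) : List (Int × (Int × Int)) → Int
  | [] => d
  | (i, (a, b)) :: rest => if a ≤ pos ∧ pos ≤ b then i else pvLocD pos d rest

theorem pvLocD_neg_one (pos : Int) (l : List (Int × (Int × Int))) :
    pvLocD pos (-1) l = pvLocate pos l := by
  induction l with
  | nil => rfl
  | cons x rest ih =>
    obtain ⟨i, a, b⟩ := x
    simp [pvLocD, pvLocate, ih]

theorem pvLocD_append_singleton (pos d : Int) (l : List (Int × (Int × Int)))
    (x : Int × (Int × Int)) :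
    pvLocD pos d (l ++ [x]) =
      pvLocD pos (if x.2.1 ≤ pos ∧ pos ≤ x.2.2 then x.1 else d) l := by
  induction l with
  | nil => obtain ⟨i, a, b⟩ := x; simp [pvLocD]
  | cons y rest ih =>
    obtain ⟨j, c, e⟩ := y
    simp [pvLocD, ih]

-- The forward fold's components equal the reverse scans with the accumulator as default.
theorem pvFold_eq_locD (s e : Int) (l : List (Int × (Int × Int))) :
    ∀ acc : Int × Int,
      l.foldl (pvAStep s e) acc =
        (pvLocD s acc.1 l.reverse, pvLocD e acc.2 l.reverse) := by
  induction l with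
  | nil => intro acc; simp [pvLocD]
  | cons x rest ih =>
    intro acc
    obtain ⟨i, a, b⟩ := x
    rw [List.foldl_cons, ih]
    simp only [List.reverse_cons, pvLocD_append_singleton]
    have h1 : (pvAStep s e acc (i, a, b)).1 = if a ≤ s ∧ s ≤ b then i else acc.1 := by
      simp only [pvAStep, ge_iff_le]; split_ifs <;> rfl
    have h2 : (pvAStep s e acc (i, a, b)).2 = if a ≤ e ∧ e ≤ b then i else acc.2 := by
      simp only [pvAStep, ge_iff_le]; split_ifs <;> rfl
    rw [h1, h2]

-- ===== VERDICT (by name: the statement is the Claim_ definition above) =====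
theorem get_start_and_end_answer_index_spec : Claim_equal_get_start_and_end_answer_index := by
  intro s e om _
  unfold Spec_get_start_and_end_answer_index get_start_and_end_answer_index get_start_and_end_answer_index_alt
  rw [pvFold_eq_locD]
  simp [pvLocD_neg_one]
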